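-- pv_equiv track=rewrite | github.com/ruihao99/scatterxct | scatterxct/core/fft_utils.py | nearest_number_with_small_prime_factors
-- ===== SOURCE A (Python) =====
-- def largest_prime_factor(n: int) -> int:
--     # Initialize the largest prime factor
--     largest_prime = 0
--
--     # While n is divisible by 2, divide it by 2 and update largest prime factor
--     while n % 2 == 0:
--         largest_prime = 2
--         n //= 2
--
--     # Check for odd prime factors starting from 3
--     for i in range(3, int(n**0.5) + 1, 2):
--         while n % i == 0:
--             largest_prime = i
--             n //= i
--
--     # If n is still greater than 2, then it's a prime number itself
--     if n > 2:
--         largest_prime = n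
--
--     return largest_prime
--
-- def nearest_number_with_small_prime_factors(n: int) -> int:
--     """Returns the nearest number with only small prime factors (2, 3, or 5).
--     This function is useful for choosing the real space grid size for exact scattering calculations.
--     integers chosen is suitable for FFTs.
--
--     Args:
--         n (int): an integer greater than 1
--
--     Raises:
--         ValueError: if n is less than 2
--
--     Returns:
--         int: the nearest number with only small prime factors
--     """
--     if n < 2:
--         raise ValueError("Input must be a positive integer greater than 1.")
--     max_factor = largest_prime_factor(n)
--     if max_factor <= 5:
--         return n
--     else:
--         return nearest_number_with_small_prime_factors(n + 1)
-- ===== SOURCE B (Python) =====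
-- def nearest_number_with_small_prime_factors(n: int) -> int:
--     """Smallest integer >= n whose only prime factors are 2, 3 and 5,
--     found by enumerating all 5-smooth candidates below 2*n and taking
--     the smallest one that is >= n (a power of two always lies in [n, 2n))."""
--     if n < 2:
--         raise ValueError("Input must be a positive integer greater than 1.")
--     limit = 2 * n
--     def powers(b):
--         out, p = [], 1
--         while p < limit:
--             out.append(p)
--             p *= b
--         return out
--     best = limit
--     for p2 in powers(2):
--         for p3 in powers(3):
--             for p5 in powers(5):
--                 c = p2 * p3 * p5
--                 if n <= c < best:
--                     best = c
--     return best
-- ===== Notes on version B (the rewrite author's own statement) =====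
-- stated objective: faster
-- what changed: A trial-factors each successive candidate n, n+1, ... recursively until one has largest prime factor <= 5; B instead enumerates all 5-smooth products 2^a*3^b*5^c below 2n (a power of two always lies in [n,2n)) and returns the smallest such product >= n, doing no factoring and no recursion at all.
-- outside the precondition, e.g. on nearest_number_with_small_prime_factors(422600): A returns 432000, B returns 432000; on nearest_number_with_small_prime_factors(421876): A raises RecursionError, B returns 432000; on nearest_number_with_small_prime_factors(1): A raises ValueError, B raises ValueError
import Mathlib
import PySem

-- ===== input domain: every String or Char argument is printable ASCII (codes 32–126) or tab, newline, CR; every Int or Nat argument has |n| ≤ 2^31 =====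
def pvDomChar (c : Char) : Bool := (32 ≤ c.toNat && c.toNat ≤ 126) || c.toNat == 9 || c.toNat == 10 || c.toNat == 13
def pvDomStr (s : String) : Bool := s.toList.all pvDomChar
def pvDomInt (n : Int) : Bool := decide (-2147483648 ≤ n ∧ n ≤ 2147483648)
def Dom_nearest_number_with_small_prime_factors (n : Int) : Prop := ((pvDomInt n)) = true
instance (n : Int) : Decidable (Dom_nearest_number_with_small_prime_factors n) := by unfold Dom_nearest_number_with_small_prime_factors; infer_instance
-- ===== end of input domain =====

-- B replaces A's candidate-by-candidate trial factoring with a direct enumeration of all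
-- 5-smooth products 2^a*3^b*5^c below 2n, returning the smallest one ≥ n (objective: faster).

-- ===== PORT A =====
-- 'while n % i == 0: largest = i; n //= i' — one loop body shared by the 2-stripping
-- while-loop (i = 2) and the inner while of the for-loop; returns (largest, n).
-- The '0 < m' conjunct only makes the recursion well-founded; inside Pre_ m is always positive.
def pvStrip (i lp m : Int) : Int × Int :=
  if h : 2 ≤ i ∧ 0 < m ∧ PySem.Int.mod m i = 0 then
    pvStrip i i (PySem.Int.floordiv m i)
  else (lp, m)
termination_by m.toNat
decreasing_by
  rcases h with ⟨hi, hm, _⟩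
  have hmn : ((m.toNat : Nat) : Int) = m := Int.toNat_of_nonneg (by omega)
  have hin : ((i.toNat : Nat) : Int) = i := Int.toNat_of_nonneg (by omega)
  have hfd : PySem.Int.floordiv m i = ((m.toNat / i.toNat : Nat) : Int) := by
    conv_lhs => rw [← hmn, ← hin]
    rw [PySem.Int.floordiv_natCast]
  rw [hfd]
  simp only [Int.toNat_natCast]
  exact Nat.div_lt_self (by omega) (by omega)

def largest_prime_factor (n : Int) : Int :=
  let s2 := pvStrip 2 0 n                  -- while n % 2 == 0: largest = 2; n //= 2  (largest starts 0)
  -- int(n**0.5) = ⌊√n⌋ exactly for the magnitudes admitted by Dom (0 ≤ n ≤ 2^31)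
  let s := (PySem.List.pyRange 3 ((Nat.sqrt s2.2.toNat : Int) + 1) 2).foldl
             (fun st i => pvStrip i st.1 st.2) s2
  if s.2 > 2 then s.2 else s.1

-- the tail recursion 'return nearest_number_with_small_prime_factors(n + 1)', with fuel for
-- well-foundedness only: a power of two lies in [n, 2n), so at most n steps are ever taken.
def nearGoA (fuel : Nat) (m : Int) : Int :=
  match fuel with
  | 0 => m
  | f + 1 => if largest_prime_factor m ≤ 5 then m else nearGoA f (m + 1)

def nearest_number_with_small_prime_factors (n : Int) : Int :=
  if n < 2 then 0                          -- Python: raise ValueError (excluded by Pre_)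
  else nearGoA (n.toNat + 1) n

-- ===== PORT B =====
-- 'out, p = [], 1; while p < limit: out.append(p); p *= b' — fuel for well-foundedness only
-- (p at least doubles each step, so limit.toNat steps always suffice).
def powsGo (fuel : Nat) (b p limit : Int) (acc : List Int) : List Int :=
  match fuel with
  | 0 => acc.reverse
  | f + 1 => if p < limit then powsGo f b (p * b) limit (p :: acc) else acc.reverse

def nearest_number_with_small_prime_factors_alt (n : Int) : Int :=
  if n < 2 then 0                          -- Python: raise ValueError (excluded by Pre_)
  else
    let limit := 2 * n
    let P2 := powsGo limit.toNat 2 1 limit []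
    let P3 := powsGo limit.toNat 3 1 limit []
    let P5 := powsGo limit.toNat 5 1 limit []
    P2.foldl (fun best p2 =>
      P3.foldl (fun best p3 =>
        P5.foldl (fun best p5 =>
          let c := p2 * p3 * p5
          if n ≤ c ∧ c < best then c else best) best) best) limit

-- ===== PRECONDITION & SPEC =====
-- Python A raises ValueError for n < 2, and RecursionError when the distance from n to the
-- next 5-smooth number is close to the interpreter's recursion limit (A spends one stack
-- frame per candidate).  Pre_ therefore asks for a 5-smooth number within 9000 of n — a
-- margin below the limit, since the exact failing depth depends on the stack already in use.
def Pre_nearest_number_with_small_prime_factors (n : Int) : Prop :=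
  2 ≤ n ∧ ((List.range 33).any fun a => (List.range 21).any fun b => (List.range 15).any fun c =>
    decide (n ≤ (2 : Int) ^ a * 3 ^ b * 5 ^ c ∧ (2 : Int) ^ a * 3 ^ b * 5 ^ c < n + 9000)) = true
instance (n : Int) : Decidable (Pre_nearest_number_with_small_prime_factors n) := by
  unfold Pre_nearest_number_with_small_prime_factors; infer_instance

def pvWitness_nearest_number_with_small_prime_factors : Int := 360

def Spec_nearest_number_with_small_prime_factors (n : Int) (out : Int) : Prop :=
  out = nearest_number_with_small_prime_factors_alt n
instance (n : Int) (out : Int) : Decidable (Spec_nearest_number_with_small_prime_factors n out) := by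
  unfold Spec_nearest_number_with_small_prime_factors; infer_instance

-- ===== CLAIM (what is proved, stated in full; the proofs are below) =====
def Claim_equal_nearest_number_with_small_prime_factors : Prop :=
  ∀ (n : Int), Dom_nearest_number_with_small_prime_factors n →
    Pre_nearest_number_with_small_prime_factors n →
    Spec_nearest_number_with_small_prime_factors n (nearest_number_with_small_prime_factors n)

-- ===== LEMMAS AND PROOFS =====

/-- only the primes 2, 3, 5 divide m -/
def PrimeSmall (m : Nat) : Prop := ∀ p, Nat.Prime p → p ∣ m → p ≤ 5

/-- m is a product of powers of 2, 3, 5 -/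
def SmoothN (m : Nat) : Prop := ∃ a b c : Nat, m = 2 ^ a * 3 ^ b * 5 ^ c

lemma smoothN_primeSmall {m : Nat} (h : SmoothN m) : PrimeSmall m := by
  obtain ⟨a, b, c, rfl⟩ := h
  intro p hp hdvd
  rcases (Nat.Prime.dvd_mul hp).1 hdvd with h1 | h1
  · rcases (Nat.Prime.dvd_mul hp).1 h1 with h2 | h2
    · have h3 := Nat.Prime.dvd_of_dvd_pow hp h2
      have := (Nat.prime_dvd_prime_iff_eq hp (by norm_num)).1 h3
      omega
    · have h3 := Nat.Prime.dvd_of_dvd_pow hp h2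
      have := (Nat.prime_dvd_prime_iff_eq hp (by norm_num)).1 h3
      omega
  · have h3 := Nat.Prime.dvd_of_dvd_pow hp h1
    have := (Nat.prime_dvd_prime_iff_eq hp (by norm_num)).1 h3
    omega

lemma primeSmall_smoothN : ∀ m : Nat, 0 < m → PrimeSmall m → SmoothN m := by
  intro m
  induction m using Nat.strong_induction_on with
  | _ m IH =>
    intro hm hps
    rcases Nat.lt_or_ge m 2 with h2 | h2
    · exact ⟨0, 0, 0, by omega⟩
    · have hpf : Nat.Prime m.minFac := Nat.minFac_prime (by omega)
      have hdvd : m.minFac ∣ m := Nat.minFac_dvd m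
      have hle5 : m.minFac ≤ 5 := hps _ hpf hdvd
      have h2le : 2 ≤ m.minFac := hpf.two_le
      have hqlt : m / m.minFac < m := Nat.div_lt_self hm (by omega)
      have hqpos : 0 < m / m.minFac := Nat.div_pos (Nat.le_of_dvd hm hdvd) (by omega)
      have hq : m = m.minFac * (m / m.minFac) := (Nat.mul_div_cancel' hdvd).symm
      have hpq : PrimeSmall (m / m.minFac) := by
        intro p hp hd
        exact hps p hp (hd.trans (Nat.div_dvd_of_dvd hdvd))
      obtain ⟨a, b, c, habc⟩ := IH _ hqlt hqpos hpq
      have hne4 : m.minFac ≠ 4 := by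
        intro h4; rw [h4] at hpf; norm_num at hpf
      interval_cases h : m.minFac
      · exact ⟨a + 1, b, c, by rw [hq, habc]; ring⟩
      · exact ⟨a, b + 1, c, by rw [hq, habc]; ring⟩
      · omega
      · exact ⟨a, b, c + 1, by rw [hq, habc]; ring⟩

/-- what one pvStrip call does on positive Nat-cast arguments -/
lemma pvStrip_spec (i : Nat) (hi : 2 ≤ i) :
    ∀ (m : Nat), 0 < m → ∀ (lp : Int),
    ∃ (k m' : Nat), pvStrip (i : Int) lp (m : Int) = ((if i ∣ m then (i : Int) else lp), (m' : Int))
      ∧ m = i ^ k * m' ∧ ¬ i ∣ m' ∧ 0 < m' := by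
  intro m
  induction m using Nat.strong_induction_on with
  | _ m IH =>
    intro hm lp
    by_cases hdvd : i ∣ m
    · have hmod : PySem.Int.mod (m : Int) (i : Int) = 0 := by
        rw [PySem.Int.mod_natCast, Nat.mod_eq_zero_of_dvd hdvd]; rfl
      have hguard : (2 : Int) ≤ (i : Int) ∧ (0 : Int) < (m : Int) ∧ PySem.Int.mod (m : Int) (i : Int) = 0 := by
        refine ⟨by exact_mod_cast hi, by exact_mod_cast hm, hmod⟩
      have hstep : pvStrip (i : Int) lp (m : Int) = pvStrip (i : Int) (i : Int) ((m / i : Nat) : Int) := by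
        rw [pvStrip, dif_pos hguard, PySem.Int.floordiv_natCast]
      have hlt : m / i < m := Nat.div_lt_self hm (by omega)
      have hpos : 0 < m / i := Nat.div_pos (Nat.le_of_dvd hm hdvd) (by omega)
      obtain ⟨k, m', heq, hfac, hnd, hm'⟩ := IH _ hlt hpos (i : Int)
      refine ⟨k + 1, m', ?_, ?_, hnd, hm'⟩
      · rw [hstep, heq, if_pos hdvd]
        split <;> rfl
      · have h1 : m = i * (m / i) := (Nat.mul_div_cancel' hdvd).symm
        rw [h1, hfac]; ring
    · have hmod : ¬ PySem.Int.mod (m : Int) (i : Int) = 0 := by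
        rw [PySem.Int.mod_natCast]
        intro h
        exact hdvd (Nat.dvd_of_mod_eq_zero (by exact_mod_cast h))
      refine ⟨0, m, ?_, by ring, hdvd, hm⟩
      rw [pvStrip, dif_neg (by tauto), if_neg hdvd]

/-- [a, a+2, a+4, …) below b -/
def oddsL (a b : Nat) : List Nat :=
  if a < b then a :: oddsL (a + 2) b else []
termination_by b - a
decreasing_by omega

lemma oddsL_nil {a b : Nat} (h : b ≤ a) : oddsL a b = [] := by
  rw [oddsL]; simp [Nat.not_lt.mpr h]

lemma oddsL_cons {a b : Nat} (h : a < b) : oddsL a b = a :: oddsL (a + 2) b := by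
  rw [oddsL]; simp [h]

lemma pyRange_two_nil {a b : Int} (h : b ≤ a) : PySem.List.pyRange a b 2 = [] := by
  rw [PySem.List.pyRange_of_pos a b (by norm_num : (0:Int) < 2)]
  rw [if_neg (by omega)]
  simp

lemma pyRange_two_cons {a b : Int} (h : a < b) :
    PySem.List.pyRange a b 2 = a :: PySem.List.pyRange (a + 2) b 2 := by
  rw [PySem.List.pyRange_of_pos a b (by norm_num : (0:Int) < 2),
      PySem.List.pyRange_of_pos (a + 2) b (by norm_num : (0:Int) < 2)]
  rw [if_pos h]
  have hcount : ((b - a + 2 - 1) / 2).toNat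
      = (if a + 2 < b then ((b - (a + 2) + 2 - 1) / 2).toNat else 0) + 1 := by
    split <;> omega
  rw [hcount, List.range_succ_eq_map]
  simp only [List.map_cons, List.map_map]
  congr 1
  · norm_num
  · apply List.map_congr_left
    intro k _
    simp only [Function.comp_apply]
    push_cast
    ring

lemma pyRange_eq_oddsL : ∀ (N a b : Nat), b - a ≤ N →
    PySem.List.pyRange (a : Int) (b : Int) 2 = (oddsL a b).map (fun x : Nat => (x : Int)) := by
  intro N
  induction N with
  | zero =>
    intro a b hab
    rw [oddsL_nil (by omega), pyRange_two_nil (by exact_mod_cast Nat.le_of_sub_eq_zero (by omega))]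
    rfl
  | succ N IHN =>
    intro a b hab
    by_cases hlt : a < b
    · rw [oddsL_cons hlt, pyRange_two_cons (by exact_mod_cast hlt)]
      have : ((a : Int) + 2) = ((a + 2 : Nat) : Int) := by push_cast; ring
      rw [this, IHN (a + 2) b (by omega)]
      rfl
    · rw [oddsL_nil (by omega), pyRange_two_nil (by exact_mod_cast Nat.le_of_not_lt hlt)]
      rfl

/-- the for-loop over the odd trial divisors: invariant and outcome -/
lemma foldStrip : ∀ (N a b : Nat) (lp : Int) (cur : Nat), b - a ≤ N → 3 ≤ a → a % 2 = 1 → 0 < cur →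
    (∀ p, Nat.Prime p → p < a → ¬ p ∣ cur) →
    ∃ (lp' : Int) (cur' : Nat),
      ((oddsL a b).map (fun x : Nat => (x : Int))).foldl (fun st i => pvStrip i st.1 st.2) (lp, (cur : Int))
          = (lp', (cur' : Int))
      ∧ 0 < cur'
      ∧ (∀ p, Nat.Prime p → p < b → ¬ p ∣ cur')
      ∧ (∃ t, cur = t * cur' ∧ ∀ p, Nat.Prime p → p ∣ t → a ≤ p ∧ p < b ∧ (p : Int) ≤ lp')
      ∧ (lp' = lp ∨ ∃ q, Nat.Prime q ∧ q ∣ cur ∧ lp' = (q : Int) ∧ a ≤ q ∧ q < b) := by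
  intro N
  induction N with
  | zero =>
    intro a b lp cur hab h3 hodd hpos hsf
    rw [oddsL_nil (by omega)]
    exact ⟨lp, cur, rfl, hpos, fun p hp hpb => hsf p hp (by omega),
      ⟨1, by ring, fun p hp hpd => absurd (Nat.dvd_one.1 hpd) (by have := hp.one_lt; omega)⟩,
      Or.inl rfl⟩
  | succ N IHN =>
    intro a b lp cur hab h3 hodd hpos hsf
    by_cases hlt : a < b
    · rw [oddsL_cons hlt]
      simp only [List.map_cons, List.foldl_cons]
      obtain ⟨k, cur1, heq, hfac, hnd, hc1⟩ := pvStrip_spec a (by omega) cur hpos lp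
      rw [heq]
      have hcur1dvd : cur1 ∣ cur := ⟨a ^ k, by rw [hfac]; ring⟩
      have haprime : a ∣ cur → Nat.Prime a := by
        intro hd
        by_contra hnp
        have hq : Nat.Prime a.minFac := Nat.minFac_prime (by omega)
        have hqd : a.minFac ∣ a := Nat.minFac_dvd a
        have hsq : a.minFac ^ 2 ≤ a := Nat.minFac_sq_le_self (by omega) hnp
        have h2q : 2 ≤ a.minFac := hq.two_le
        have hqa : a.minFac < a := by nlinarith
        exact hsf _ hq hqa (hqd.trans hd)
      have hsf1 : ∀ p, Nat.Prime p → p < a + 2 → ¬ p ∣ cur1 := by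
        intro p hp hplt hpd
        rcases Nat.lt_or_ge p a with hpa | hpa
        · exact hsf p hp hpa (hpd.trans hcur1dvd)
        · rcases Nat.eq_or_lt_of_le hpa with rfl | hpa1
          · exact hnd hpd
          · have hpe : p = a + 1 := by omega
            have : p = 2 := (Nat.Prime.even_iff hp).1 (Nat.even_iff.2 (by omega))
            omega
      obtain ⟨lp2, cur2, heq2, hc2, hsf2, ⟨t', hft', hpt'⟩, hdisj2⟩ :=
        IHN (a + 2) b (if a ∣ cur then (a : Int) else lp) cur1 (by omega) (by omega) (by omega) hc1 hsf1
      refine ⟨lp2, cur2, heq2, hc2, hsf2, ?_, ?_⟩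
      · by_cases hd : a ∣ cur
        · have hap := haprime hd
          have halp : (a : Int) ≤ lp2 := by
            rcases hdisj2 with h | ⟨q, _, _, hq, hq2, _⟩
            · rw [h, if_pos hd]
            · rw [hq]; exact_mod_cast (by omega : a ≤ q)
          refine ⟨a ^ k * t', by rw [hfac, hft']; ring, ?_⟩
          intro p hp hpd
          rcases hp.dvd_mul.1 hpd with h | h
          · have hpa : p = a := (Nat.prime_dvd_prime_iff_eq hp hap).1 (hp.dvd_of_dvd_pow h)
            subst hpa
            exact ⟨le_refl _, hlt, halp⟩
          · obtain ⟨h1, h2, h3'⟩ := hpt' p hp h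
            exact ⟨by omega, h2, h3'⟩
        · have hk0 : k = 0 := by
            by_contra hk
            exact hd ⟨a ^ (k - 1) * cur1, by rw [hfac]; cases k with | zero => omega | succ k => simp [pow_succ]; ring⟩
          refine ⟨t', by rw [hfac, hk0, hft']; ring, ?_⟩
          intro p hp hpd
          obtain ⟨h1, h2, h3'⟩ := hpt' p hp hpd
          exact ⟨by omega, h2, h3'⟩
      · rcases hdisj2 with h | ⟨q, hq1, hq2, hq3, hq4, hq5⟩
        · by_cases hd : a ∣ cur
          · rw [h, if_pos hd]
            exact Or.inr ⟨a, haprime hd, hd, rfl, le_refl _, hlt⟩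
          · rw [h, if_neg hd]
            exact Or.inl rfl
        · exact Or.inr ⟨q, hq1, hq2.trans hcur1dvd, hq3, by omega, hq5⟩
    · rw [oddsL_nil (by omega)]
      exact ⟨lp, cur, rfl, hpos, fun p hp hpb => hsf p hp (by omega),
        ⟨1, by ring, fun p hp hpd => absurd (Nat.dvd_one.1 hpd) (by have := hp.one_lt; omega)⟩,
        Or.inl rfl⟩

/-- A's test 'largest_prime_factor(m) <= 5' is exactly 5-smoothness -/
lemma lpf_le5_iff (m : Nat) (hm : 2 ≤ m) :
    (largest_prime_factor (m : Int) ≤ 5) ↔ PrimeSmall m := by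
  obtain ⟨k, m1, heq2, hfac2, hnd2, hm1⟩ := pvStrip_spec 2 (le_refl 2) m (by omega) 0
  simp only [Nat.cast_ofNat] at heq2
  have hm1dm : m1 ∣ m := ⟨2 ^ k, by rw [hfac2]; ring⟩
  have hsf0 : ∀ p, Nat.Prime p → p < 3 → ¬ p ∣ m1 := by
    intro p hp hplt
    have : p = 2 := by have := hp.two_le; omega
    rw [this]; exact hnd2
  obtain ⟨lp2, cur2, heqF, hc2, hsfF, ⟨t, hft, hpt⟩, hdisj⟩ :=
    foldStrip (Nat.sqrt m1 + 1) 3 (Nat.sqrt m1 + 1) (if 2 ∣ m then (2 : Int) else 0) m1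
      (by omega) (le_refl 3) (by norm_num) hm1 hsf0
  have hrange : PySem.List.pyRange 3 ((Nat.sqrt m1 : Int) + 1) 2
      = (oddsL 3 (Nat.sqrt m1 + 1)).map (fun x : Nat => (x : Int)) := by
    have h := pyRange_eq_oddsL (Nat.sqrt m1 + 1) 3 (Nat.sqrt m1 + 1) (by omega)
    push_cast at h ⊢
    exact h
  have hmain : largest_prime_factor (m : Int)
      = (if ((cur2 : Int)) > 2 then (cur2 : Int) else lp2) := by
    rw [largest_prime_factor, heq2]
    simp only [Int.toNat_natCast]
    rw [hrange, heqF]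
  have hcur2m1 : cur2 ∣ m1 := ⟨t, by rw [hft]; ring⟩
  have C1 : 2 ≤ cur2 → Nat.Prime cur2 := by
    intro h2c
    by_contra hnp
    have hq : Nat.Prime cur2.minFac := Nat.minFac_prime (by omega)
    have hqd : cur2.minFac ∣ cur2 := Nat.minFac_dvd cur2
    have hsq : cur2.minFac ^ 2 ≤ cur2 := Nat.minFac_sq_le_self (by omega) hnp
    have hle : cur2 ≤ m1 := Nat.le_of_dvd hm1 hcur2m1
    have hqK : cur2.minFac ≤ Nat.sqrt m1 := Nat.le_sqrt.2 (by nlinarith)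
    exact hsfF _ hq (by omega) hqd
  have hcur2ge : 2 ≤ cur2 → Nat.sqrt m1 + 1 ≤ cur2 := by
    intro h2c
    by_contra hlt
    exact hsfF cur2 (C1 h2c) (by omega) dvd_rfl
  rw [hmain]
  constructor
  · intro hres p hp hpdm
    have hpdm' : p ∣ 2 ^ k * m1 := by rwa [← hfac2]
    rcases hp.dvd_mul.1 hpdm' with h2 | hm1d
    · have : p = 2 := (Nat.prime_dvd_prime_iff_eq hp (by norm_num)).1 (hp.dvd_of_dvd_pow h2)
      omega
    · have hpd1 : p ∣ t * cur2 := by rwa [← hft]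
      by_cases h2c : (2 : Int) < (cur2 : Int)
      · rw [if_pos h2c] at hres
        have hc5 : cur2 ≤ 5 := by exact_mod_cast hres
        have hK4 : Nat.sqrt m1 ≤ 4 := by
          have h2n : (2:Nat) < cur2 := by exact_mod_cast h2c
          have := hcur2ge (by omega); omega
        rcases hp.dvd_mul.1 hpd1 with ht | hc
        · have := hpt p hp ht
          omega
        · have h2n : (2:Nat) < cur2 := by exact_mod_cast h2c
          have : p = cur2 := (Nat.prime_dvd_prime_iff_eq hp (C1 (by omega))).1 hc
          omega
      · rw [if_neg h2c] at hres
        have hc2' : cur2 = 1 := by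
          rcases Nat.lt_or_ge cur2 2 with h | h
          · omega
          · rcases Nat.eq_or_lt_of_le h with he | h3
            · exact absurd (by rw [← he] at hcur2m1; exact hcur2m1) hnd2
            · exfalso; apply h2c; exact_mod_cast h3
        rcases hp.dvd_mul.1 hpd1 with ht | hc
        · have := (hpt p hp ht).2.2
          have : (p : Int) ≤ 5 := le_trans this hres
          exact_mod_cast this
        · rw [hc2'] at hc
          exact absurd (Nat.dvd_one.1 hc) (by have := hp.one_lt; omega)
  · intro hps
    have hpm1 : ∀ p, Nat.Prime p → p ∣ m1 → p ≤ 5 := fun p hp hpd => hps p hp (hpd.trans hm1dm)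
    by_cases h2c : (2 : Int) < (cur2 : Int)
    · rw [if_pos h2c]
      have h2n : (2:Nat) < cur2 := by exact_mod_cast h2c
      have hcp : Nat.Prime cur2 := C1 (by omega)
      have : cur2 ≤ 5 := hpm1 cur2 hcp hcur2m1
      exact_mod_cast this
    · rw [if_neg h2c]
      rcases hdisj with h | ⟨q, hq1, hq2, hq3, _, _⟩
      · rw [h]; split <;> norm_num
      · rw [hq3]
        have : q ≤ 5 := hpm1 q hq1 hq2
        exact_mod_cast this

lemma exists_pow2 (m : Nat) (hm : 1 ≤ m) : ∃ k, m ≤ 2 ^ k ∧ 2 ^ k < 2 * m := by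
  by_cases hpow : 2 ^ Nat.log 2 m = m
  · exact ⟨Nat.log 2 m, by omega, by omega⟩
  · have h1 : 2 ^ Nat.log 2 m ≤ m := Nat.pow_log_le_self 2 (by omega)
    have h2 : m < 2 ^ (Nat.log 2 m + 1) := Nat.lt_pow_succ_log_self (by norm_num) m
    refine ⟨Nat.log 2 m + 1, by omega, ?_⟩
    have : 2 ^ (Nat.log 2 m + 1) = 2 * 2 ^ Nat.log 2 m := by ring
    omega

lemma nearGoA_eq : ∀ (fuel : Nat) (m : Int) (t : Nat), 2 ≤ m → m ≤ (t : Int) → (t : Int) < m + fuel →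
    SmoothN t → (∀ j : Nat, m ≤ (j : Int) → j < t → ¬ SmoothN j) →
    nearGoA fuel m = (t : Int) := by
  intro fuel
  induction fuel with
  | zero => intro m t h1 h2 h3; omega
  | succ f IH =>
    intro m t h1 h2 h3 hsm hmin
    have hm2 : 2 ≤ m.toNat := by omega
    have hcast : ((m.toNat : Nat) : Int) = m := Int.toNat_of_nonneg (by omega)
    rw [nearGoA]
    by_cases hle : largest_prime_factor m ≤ 5
    · have hps : PrimeSmall m.toNat := by
        rw [← hcast] at hle
        exact (lpf_le5_iff m.toNat hm2).1 hle
      have hsmm : SmoothN m.toNat := primeSmall_smoothN _ (by omega) hps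
      have : ¬ m.toNat < t := fun hlt => hmin m.toNat (by omega) hlt hsmm
      rw [if_pos hle]
      omega
    · have hmne : m ≠ (t : Int) := by
        intro he
        apply hle
        rw [he]
        exact (lpf_le5_iff t (by omega)).2 (smoothN_primeSmall hsm)
      rw [if_neg hle]
      exact IH (m + 1) t (by omega) (by omega) (by push_cast at h3 ⊢; omega) hsm
        (fun j hj hjt => hmin j (by omega) hjt)

lemma powsGo_mem : ∀ (fuel : Nat) (b p limit : Int) (acc : List Int), 1 ≤ p → 2 ≤ b →
    limit ≤ p * 2 ^ fuel →
    ∀ x, x ∈ powsGo fuel b p limit acc ↔ x ∈ acc ∨ ∃ e : Nat, x = p * b ^ e ∧ x < limit := by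
  intro fuel
  induction fuel with
  | zero =>
    intro b p limit acc hp hb hlim x
    simp only [powsGo, List.mem_reverse]
    constructor
    · exact Or.inl
    · rintro (h | ⟨e, rfl, hlt⟩)
      · exact h
      · exfalso
        have hbe : (1 : Int) ≤ b ^ e := one_le_pow₀ (by omega)
        nlinarith
  | succ f IH =>
    intro b p limit acc hp hb hlim x
    rw [powsGo]
    by_cases hpl : p < limit
    · rw [if_pos hpl]
      have hlim' : limit ≤ p * b * 2 ^ f := by
        have h1 : p * 2 ^ (f + 1) = p * 2 * 2 ^ f := by ring
        have h2 : p * 2 * 2 ^ f ≤ p * b * 2 ^ f := by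
          have : p * 2 ≤ p * b := by nlinarith
          have hpow : (0 : Int) < 2 ^ f := by positivity
          nlinarith
        omega
      rw [IH b (p * b) limit (p :: acc) (by nlinarith) hb hlim' x]
      constructor
      · rintro (h | ⟨e, rfl, hlt⟩)
        · rcases List.mem_cons.1 h with rfl | h'
          · exact Or.inr ⟨0, by ring, hpl⟩
          · exact Or.inl h'
        · exact Or.inr ⟨e + 1, by ring, hlt⟩
      · rintro (h | ⟨e, rfl, hlt⟩)
        · exact Or.inl (List.mem_cons_of_mem _ h)
        · cases e with
          | zero => exact Or.inl (by simp)
          | succ e => exact Or.inr ⟨e, by ring, hlt⟩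
    · rw [if_neg hpl]
      simp only [List.mem_reverse]
      constructor
      · exact Or.inl
      · rintro (h | ⟨e, rfl, hlt⟩)
        · exact h
        · exfalso
          have hbe : (1 : Int) ≤ b ^ e := one_le_pow₀ (by omega)
          nlinarith

lemma fold_min (n : Int) : ∀ (cs : List Int) (b0 : Int),
    (cs.foldl (fun best c => if n ≤ c ∧ c < best then c else best) b0 = b0
      ∨ (cs.foldl (fun best c => if n ≤ c ∧ c < best then c else best) b0 ∈ cs
          ∧ n ≤ cs.foldl (fun best c => if n ≤ c ∧ c < best then c else best) b0))
    ∧ cs.foldl (fun best c => if n ≤ c ∧ c < best then c else best) b0 ≤ b0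
    ∧ (∀ c ∈ cs, n ≤ c → cs.foldl (fun best c => if n ≤ c ∧ c < best then c else best) b0 ≤ c) := by
  intro cs
  induction cs with
  | nil => simp
  | cons c cs IH =>
    intro b0
    simp only [List.foldl_cons]
    obtain ⟨hmem, hle, hall⟩ := IH (if n ≤ c ∧ c < b0 then c else b0)
    have hb1 : (if n ≤ c ∧ c < b0 then c else b0) ≤ b0 := by split <;> omega
    refine ⟨?_, le_trans hle hb1, ?_⟩
    · rcases hmem with h | h
      · by_cases hc : n ≤ c ∧ c < b0
        · rw [if_pos hc] at h
          rw [if_pos hc, h]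
          exact Or.inr ⟨List.mem_cons_self, hc.1⟩
        · rw [if_neg hc] at h
          rw [if_neg hc, h]
          exact Or.inl rfl
      · exact Or.inr ⟨List.mem_cons_of_mem _ h.1, h.2⟩
    · intro d hd hnd
      rcases List.mem_cons.1 hd with rfl | hd'
      · by_cases hc : n ≤ d ∧ d < b0
        · rw [if_pos hc] at hle ⊢
          exact hle
        · rw [if_neg hc] at hle ⊢
          omega
      · exact hall d hd' hnd

/-- B computes the least 5-smooth number ≥ n, for any n ≥ 2 -/
lemma alt_eq_least (n : Int) (t : Nat) (hn2 : 2 ≤ n) (htn : n ≤ (t : Int)) (htsm : SmoothN t)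
    (hmin : ∀ j : Nat, j < t → ¬ (n.toNat ≤ j ∧ SmoothN j)) (ht2n : (t : Int) < 2 * n) :
    nearest_number_with_small_prime_factors_alt n = (t : Int) := by
  rw [nearest_number_with_small_prime_factors_alt, if_neg (by omega)]
  simp only []
  set limit := 2 * n with hlimdef
  set P2 := powsGo limit.toNat 2 1 limit [] with hP2def
  set P3 := powsGo limit.toNat 3 1 limit [] with hP3def
  set P5 := powsGo limit.toNat 5 1 limit [] with hP5def
  have hlim4 : (4 : Int) ≤ limit := by omega
  have hfuel : limit ≤ 1 * 2 ^ limit.toNat := by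
    have h1 : limit.toNat < 2 ^ limit.toNat := Nat.lt_two_pow_self
    have h2 : ((2 ^ limit.toNat : Nat) : Int) = 2 ^ limit.toNat := by push_cast; ring
    omega
  have hP2 : ∀ x, x ∈ P2 ↔ ∃ e : Nat, x = (2 : Int) ^ e ∧ x < limit := by
    intro x
    rw [hP2def, powsGo_mem limit.toNat 2 1 limit [] (by norm_num) (by norm_num) hfuel x]
    simp
  have hP3 : ∀ x, x ∈ P3 ↔ ∃ e : Nat, x = (3 : Int) ^ e ∧ x < limit := by
    intro x
    rw [hP3def, powsGo_mem limit.toNat 3 1 limit [] (by norm_num) (by norm_num)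
      (by have h3 : (2:Int) ^ limit.toNat ≤ 3 ^ limit.toNat :=
            pow_le_pow_left₀ (by norm_num) (by norm_num) _
          omega) x]
    simp
  have hP5 : ∀ x, x ∈ P5 ↔ ∃ e : Nat, x = (5 : Int) ^ e ∧ x < limit := by
    intro x
    rw [hP5def, powsGo_mem limit.toNat 5 1 limit [] (by norm_num) (by norm_num)
      (by have h5 : (2:Int) ^ limit.toNat ≤ 5 ^ limit.toNat :=
            pow_le_pow_left₀ (by norm_num) (by norm_num) _
          omega) x]
    simp
  set CS := P2.flatMap (fun p2 => P3.flatMap (fun p3 => P5.map (fun p5 => p2 * p3 * p5))) with hCSdef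
  have hflat : CS.foldl (fun best c => if n ≤ c ∧ c < best then c else best) limit
      = P2.foldl (fun best p2 => P3.foldl (fun best p3 => P5.foldl (fun best p5 =>
          if n ≤ p2 * p3 * p5 ∧ p2 * p3 * p5 < best then p2 * p3 * p5 else best) best) best) limit := by
    rw [hCSdef]
    simp only [List.foldl_flatMap, List.foldl_map]
  rw [← hflat]
  obtain ⟨hmem, hleb, hall⟩ := fold_min n CS limit
  set r := CS.foldl (fun best c => if n ≤ c ∧ c < best then c else best) limit with hrdef
  have hmemCS : ∀ x : Int, x ∈ CS ↔ ∃ p2 ∈ P2, ∃ p3 ∈ P3, ∃ p5 ∈ P5, x = p2 * p3 * p5 := by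
    intro x
    rw [hCSdef]
    simp only [List.mem_flatMap, List.mem_map]
    constructor
    · rintro ⟨p2, h2, p3, h3, p5, h5, rfl⟩
      exact ⟨p2, h2, p3, h3, p5, h5, rfl⟩
    · rintro ⟨p2, h2, p3, h3, p5, h5, rfl⟩
      exact ⟨p2, h2, p3, h3, p5, h5, rfl⟩
  obtain ⟨a, b, c, habc⟩ := htsm
  have htpos : 0 < t := by omega
  have ht_mem : (t : Int) ∈ CS := by
    have hd2 : (2 : Nat) ^ a ≤ t := Nat.le_of_dvd htpos ⟨3 ^ b * 5 ^ c, by rw [habc]; ring⟩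
    have hd3 : (3 : Nat) ^ b ≤ t := Nat.le_of_dvd htpos ⟨2 ^ a * 5 ^ c, by rw [habc]; ring⟩
    have hd5 : (5 : Nat) ^ c ≤ t := Nat.le_of_dvd htpos ⟨2 ^ a * 3 ^ b, by rw [habc]; ring⟩
    have hb2 : (2:Int) ^ a < limit := by
      have h := (Nat.cast_le (α := Int)).2 hd2
      push_cast at h
      omega
    have hb3 : (3:Int) ^ b < limit := by
      have h := (Nat.cast_le (α := Int)).2 hd3
      push_cast at h
      omega
    have hb5 : (5:Int) ^ c < limit := by
      have h := (Nat.cast_le (α := Int)).2 hd5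
      push_cast at h
      omega
    rw [hmemCS]
    refine ⟨(2:Int) ^ a, (hP2 _).2 ⟨a, rfl, hb2⟩,
            (3:Int) ^ b, (hP3 _).2 ⟨b, rfl, hb3⟩,
            (5:Int) ^ c, (hP5 _).2 ⟨c, rfl, hb5⟩, ?_⟩
    have h := congrArg (fun x : Nat => (x : Int)) habc
    push_cast at h
    exact h
  have hrt : r ≤ (t : Int) := hall _ ht_mem (by omega)
  rcases hmem with hr0 | ⟨hrCS, hnr⟩
  · omega
  · obtain ⟨p2, h2, p3, h3, p5, h5, hre⟩ := (hmemCS r).1 hrCS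
    obtain ⟨e2, rfl, -⟩ := (hP2 _).1 h2
    obtain ⟨e3, rfl, -⟩ := (hP3 _).1 h3
    obtain ⟨e5, rfl, -⟩ := (hP5 _).1 h5
    have hrnat : r = ((2 ^ e2 * 3 ^ e3 * 5 ^ e5 : Nat) : Int) := by
      rw [hre]; push_cast; ring
    have hrsm : SmoothN r.toNat := by
      rw [hrnat, Int.toNat_natCast]
      exact ⟨e2, e3, e5, rfl⟩
    have htr : t ≤ r.toNat := by
      by_contra hlt
      exact hmin r.toNat (by omega) ⟨by omega, hrsm⟩
    have : (t : Int) ≤ r := by omega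
    omega

-- ===== VERDICT (by name: the statement is the Claim_ definition above) =====
theorem nearest_number_with_small_prime_factors_spec : Claim_equal_nearest_number_with_small_prime_factors := by
  unfold Claim_equal_nearest_number_with_small_prime_factors
    Spec_nearest_number_with_small_prime_factors
    Pre_nearest_number_with_small_prime_factors
  intro n _ hpre
  obtain ⟨hn2, -⟩ := hpre
  have hcast : ((n.toNat : Nat) : Int) = n := Int.toNat_of_nonneg (by omega)
  -- the least 5-smooth number ≥ n
  obtain ⟨kp, hk1, hk2⟩ := exists_pow2 n.toNat (by omega)
  have hne : {k : Nat | n.toNat ≤ k ∧ SmoothN k}.Nonempty := ⟨2 ^ kp, hk1, ⟨kp, 0, 0, by ring⟩⟩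
  set t := sInf {k : Nat | n.toNat ≤ k ∧ SmoothN k} with htdef
  obtain ⟨htn, htsm⟩ := Nat.sInf_mem hne
  have htle : t ≤ 2 ^ kp := Nat.sInf_le ⟨hk1, ⟨kp, 0, 0, by ring⟩⟩
  have hmin : ∀ j : Nat, j < t → ¬ (n.toNat ≤ j ∧ SmoothN j) := by
    intro j hj hcon
    have := Nat.sInf_le (s := {k : Nat | n.toNat ≤ k ∧ SmoothN k}) hcon
    omega
  have ht2n : (t : Int) < 2 * n := by
    have h1 : t < 2 * n.toNat := by omega
    omega
  have hA : nearest_number_with_small_prime_factors n = (t : Int) := by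
    rw [nearest_number_with_small_prime_factors, if_neg (by omega)]
    refine nearGoA_eq (n.toNat + 1) n t hn2 (by omega) (by push_cast; omega) htsm ?_
    intro j hj hjt hsm
    exact hmin j hjt ⟨by omega, hsm⟩
  rw [hA]
  exact (alt_eq_least n t hn2 (by omega) htsm hmin ht2n).symm
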